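-- pv_equiv track=rewrite | github.com/divyansh29-stack/It-Helpdesk | app.py | get_secondary_fallback_steps
-- ===== SOURCE A (Python) =====
-- def get_secondary_fallback_steps(problem):
--     problem_lower = problem.lower()
--
--     # PC/Computer issues
--     if any(term in problem_lower for term in ['pc', 'computer', 'desktop', 'laptop', 'hanging', 'freeze', 'slow', 'crash']):
--         return """1. Check for Windows updates and install if available
-- 2. Run System File Checker (SFC) by typing 'sfc /scannow' in Command Prompt
-- 3. Check for hardware issues using built-in diagnostics
-- 4. Try starting in Safe Mode to determine if it's a software conflict
-- 5. Check Event Viewer for specific error codes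
-- 6. Perform a memory diagnostic test
-- 7. Disconnect external devices and test again
--
-- This should help identify whether it's a hardware or software issue."""
--
--     # Network/Internet issues
--     elif any(term in problem_lower for term in ['network', 'internet', 'wifi', 'connection', 'connect', 'disconnected']):
--         return """1. Reset TCP/IP stack by running 'netsh winsock reset' in Command Prompt
-- 2. Release and renew your IP address using 'ipconfig /release' and 'ipconfig /renew'
-- 3. Flush DNS cache with 'ipconfig /flushdns'
-- 4. Change DNS settings to public DNS (like Google's 8.8.8.8 and 8.8.4.4)
-- 5. Check for network adapter driver updates
-- 6. Disable VPN or proxy if using one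
-- 7. Reset all network devices in the correct order (modem first, then router)
--
-- These steps address more advanced network configuration issues."""
--
--     # Email issues
--     elif any(term in problem_lower for term in ['email', 'outlook', 'mail', 'gmail', 'message']):
--         return """1. Run Outlook in Safe Mode (hold Ctrl while launching)
-- 2. Create a new Outlook profile and test with that
-- 3. Check if your mailbox needs to be repaired with the Inbox Repair Tool (scanpst.exe)
-- 4. Disable add-ins that might be causing issues
-- 5. Check your email account settings for maximum size limits
-- 6. Check if your email client is in offline mode
-- 7. Verify your anti-virus isn't blocking email connections
--
-- These solutions target Outlook-specific issues and account configuration problems."""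
--
--     # Printer issues
--     elif any(term in problem_lower for term in ['print', 'printer', 'scanning', 'scanner']):
--         return """1. Clear the print queue (stop and restart Print Spooler service)
-- 2. Check printer IP address and make sure it hasn't changed
-- 3. Set a static IP for the printer if possible
-- 4. Update printer firmware (check manufacturer website)
-- 5. Check if printer needs calibration
-- 6. Try a different USB port or cable if directly connected
-- 7. Print directly to the device using its web interface if available
--
-- These steps help with more complex printer connection and driver issues."""
--
--     # Software/Application issues
--     elif any(term in problem_lower for term in ['software', 'application', 'program', 'app', 'not working']):
--         return """1. Launch the application with admin privileges
-- 2. Check for conflicts with anti-virus or firewall settings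
-- 3. Run the application in compatibility mode
-- 4. Create a new user profile and test there
-- 5. Check application logs for specific errors
-- 6. Verify all dependencies are installed (like .NET Framework or Visual C++ Redistributables)
-- 7. Try repairing the installation through Control Panel > Programs and Features
--
-- These steps help identify permission issues and software conflicts."""
--
--     # Login/Access issues
--     elif any(term in problem_lower for term in ['login', 'password', 'access', 'account', 'authentication']):
--         return """1. Check if your account is locked due to too many failed attempts
-- 2. Ensure your device time and date are accurate (important for authentication)
-- 3. Check if you need to connect to VPN first before accessing certain systems
-- 4. Try accessing from a different device to determine if it's device-specific
-- 5. Check if multi-factor authentication needs to be reconfigured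
-- 6. Verify that your account hasn't expired or been disabled
-- 7. Make sure you're using the correct domain if applicable (corporate vs. local account)
--
-- These steps address more complex authentication and account access issues."""
--
--     # Generic fallback
--     else:
--         return """1. Take screenshots of any error messages for support reference
-- 2. Check if colleagues are experiencing similar issues
-- 3. Note when the issue started and any changes made around that time
-- 4. Try using an alternative software/method temporarily if available
-- 5. Check system requirements for the software you're using
-- 6. Review recent updates that might have affected system behavior
-- 7. Create a detailed document of when the issue occurs and steps to reproduce
--
-- Having this documentation will help support staff diagnose and fix the issue more quickly."""
-- ===== SOURCE B (Python) =====
-- # B: instead of an ordered cascade of short-circuit category checks, do a single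
-- # accumulator pass over a flat (keyword, priority) list computing the MINIMUM
-- # matched category index, then one indexed lookup into the response table
-- # (index 6 = generic fallback). Priorities ascend in A's branch order, so the
-- # minimum matched index equals A's first matching branch.
--
-- _CATEGORIES = [
--     ['pc', 'computer', 'desktop', 'laptop', 'hanging', 'freeze', 'slow', 'crash'],
--     ['network', 'internet', 'wifi', 'connection', 'connect', 'disconnected'],
--     ['email', 'outlook', 'mail', 'gmail', 'message'],
--     ['print', 'printer', 'scanning', 'scanner'],
--     ['software', 'application', 'program', 'app', 'not working'],
--     ['login', 'password', 'access', 'account', 'authentication'],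
-- ]
--
-- _FLAT = [(kw, i) for i, kws in enumerate(_CATEGORIES) for kw in kws]
--
-- _RESPONSES = [
--     """1. Check for Windows updates and install if available
-- 2. Run System File Checker (SFC) by typing 'sfc /scannow' in Command Prompt
-- 3. Check for hardware issues using built-in diagnostics
-- 4. Try starting in Safe Mode to determine if it's a software conflict
-- 5. Check Event Viewer for specific error codes
-- 6. Perform a memory diagnostic test
-- 7. Disconnect external devices and test again
--
-- This should help identify whether it's a hardware or software issue.""",
--     """1. Reset TCP/IP stack by running 'netsh winsock reset' in Command Prompt
-- 2. Release and renew your IP address using 'ipconfig /release' and 'ipconfig /renew'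
-- 3. Flush DNS cache with 'ipconfig /flushdns'
-- 4. Change DNS settings to public DNS (like Google's 8.8.8.8 and 8.8.4.4)
-- 5. Check for network adapter driver updates
-- 6. Disable VPN or proxy if using one
-- 7. Reset all network devices in the correct order (modem first, then router)
--
-- These steps address more advanced network configuration issues.""",
--     """1. Run Outlook in Safe Mode (hold Ctrl while launching)
-- 2. Create a new Outlook profile and test with that
-- 3. Check if your mailbox needs to be repaired with the Inbox Repair Tool (scanpst.exe)
-- 4. Disable add-ins that might be causing issues
-- 5. Check your email account settings for maximum size limits
-- 6. Check if your email client is in offline mode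
-- 7. Verify your anti-virus isn't blocking email connections
--
-- These solutions target Outlook-specific issues and account configuration problems.""",
--     """1. Clear the print queue (stop and restart Print Spooler service)
-- 2. Check printer IP address and make sure it hasn't changed
-- 3. Set a static IP for the printer if possible
-- 4. Update printer firmware (check manufacturer website)
-- 5. Check if printer needs calibration
-- 6. Try a different USB port or cable if directly connected
-- 7. Print directly to the device using its web interface if available
--
-- These steps help with more complex printer connection and driver issues.""",
--     """1. Launch the application with admin privileges
-- 2. Check for conflicts with anti-virus or firewall settings
-- 3. Run the application in compatibility mode
-- 4. Create a new user profile and test there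
-- 5. Check application logs for specific errors
-- 6. Verify all dependencies are installed (like .NET Framework or Visual C++ Redistributables)
-- 7. Try repairing the installation through Control Panel > Programs and Features
--
-- These steps help identify permission issues and software conflicts.""",
--     """1. Check if your account is locked due to too many failed attempts
-- 2. Ensure your device time and date are accurate (important for authentication)
-- 3. Check if you need to connect to VPN first before accessing certain systems
-- 4. Try accessing from a different device to determine if it's device-specific
-- 5. Check if multi-factor authentication needs to be reconfigured
-- 6. Verify that your account hasn't expired or been disabled
-- 7. Make sure you're using the correct domain if applicable (corporate vs. local account)
--
-- These steps address more complex authentication and account access issues.""",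
--     """1. Take screenshots of any error messages for support reference
-- 2. Check if colleagues are experiencing similar issues
-- 3. Note when the issue started and any changes made around that time
-- 4. Try using an alternative software/method temporarily if available
-- 5. Check system requirements for the software you're using
-- 6. Review recent updates that might have affected system behavior
-- 7. Create a detailed document of when the issue occurs and steps to reproduce
--
-- Having this documentation will help support staff diagnose and fix the issue more quickly.""",
-- ]
--
-- def get_secondary_fallback_steps(problem):
--     pl = problem.lower()
--     best = 6
--     for kw, idx in _FLAT:
--         if kw in pl:
--             best = min(best, idx)
--     return _RESPONSES[best]
-- ===== Notes on version B (the rewrite author's own statement) =====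
-- stated objective: alternative
-- what changed: Replaces the ordered if/elif cascade of short-circuit any()-checks with a single accumulator pass over a flat (keyword, priority) list that computes the minimum matched category index, followed by one indexed lookup into a 7-entry response table (index 6 = fallback); correct because priorities ascend in A's branch order, so the minimum matched index is A's first matching branch.
import Mathlib
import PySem

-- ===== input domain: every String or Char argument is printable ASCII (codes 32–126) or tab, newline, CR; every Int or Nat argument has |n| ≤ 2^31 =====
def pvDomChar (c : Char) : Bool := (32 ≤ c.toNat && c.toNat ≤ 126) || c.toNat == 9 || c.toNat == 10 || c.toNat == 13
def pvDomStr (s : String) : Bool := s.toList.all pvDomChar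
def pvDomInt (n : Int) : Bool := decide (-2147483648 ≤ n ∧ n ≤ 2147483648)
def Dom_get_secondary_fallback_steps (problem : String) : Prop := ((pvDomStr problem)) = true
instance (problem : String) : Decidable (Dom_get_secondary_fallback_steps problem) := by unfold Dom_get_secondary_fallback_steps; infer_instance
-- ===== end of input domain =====

-- B replaces A's if/elif cascade by one accumulator pass computing the minimum matched
-- category index over a flat (keyword, priority) list, then a single table lookup; objective: alternative.

-- ===== PORT A =====
def get_secondary_fallback_steps (problem : String) : String :=
  let problem_lower := PySem.Str.lower problem
  if ["pc", "computer", "desktop", "laptop", "hanging", "freeze", "slow", "crash"].any (fun term => PySem.Str.isIn term problem_lower) then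
    "1. Check for Windows updates and install if available\n2. Run System File Checker (SFC) by typing 'sfc /scannow' in Command Prompt\n3. Check for hardware issues using built-in diagnostics\n4. Try starting in Safe Mode to determine if it's a software conflict\n5. Check Event Viewer for specific error codes\n6. Perform a memory diagnostic test\n7. Disconnect external devices and test again\n\nThis should help identify whether it's a hardware or software issue."
  else
  if ["network", "internet", "wifi", "connection", "connect", "disconnected"].any (fun term => PySem.Str.isIn term problem_lower) then
    "1. Reset TCP/IP stack by running 'netsh winsock reset' in Command Prompt\n2. Release and renew your IP address using 'ipconfig /release' and 'ipconfig /renew'\n3. Flush DNS cache with 'ipconfig /flushdns'\n4. Change DNS settings to public DNS (like Google's 8.8.8.8 and 8.8.4.4)\n5. Check for network adapter driver updates\n6. Disable VPN or proxy if using one\n7. Reset all network devices in the correct order (modem first, then router)\n\nThese steps address more advanced network configuration issues."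
  else
  if ["email", "outlook", "mail", "gmail", "message"].any (fun term => PySem.Str.isIn term problem_lower) then
    "1. Run Outlook in Safe Mode (hold Ctrl while launching)\n2. Create a new Outlook profile and test with that\n3. Check if your mailbox needs to be repaired with the Inbox Repair Tool (scanpst.exe)\n4. Disable add-ins that might be causing issues\n5. Check your email account settings for maximum size limits\n6. Check if your email client is in offline mode\n7. Verify your anti-virus isn't blocking email connections\n\nThese solutions target Outlook-specific issues and account configuration problems."
  else
  if ["print", "printer", "scanning", "scanner"].any (fun term => PySem.Str.isIn term problem_lower) then
    "1. Clear the print queue (stop and restart Print Spooler service)\n2. Check printer IP address and make sure it hasn't changed\n3. Set a static IP for the printer if possible\n4. Update printer firmware (check manufacturer website)\n5. Check if printer needs calibration\n6. Try a different USB port or cable if directly connected\n7. Print directly to the device using its web interface if available\n\nThese steps help with more complex printer connection and driver issues."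
  else
  if ["software", "application", "program", "app", "not working"].any (fun term => PySem.Str.isIn term problem_lower) then
    "1. Launch the application with admin privileges\n2. Check for conflicts with anti-virus or firewall settings\n3. Run the application in compatibility mode\n4. Create a new user profile and test there\n5. Check application logs for specific errors\n6. Verify all dependencies are installed (like .NET Framework or Visual C++ Redistributables)\n7. Try repairing the installation through Control Panel > Programs and Features\n\nThese steps help identify permission issues and software conflicts."
  else
  if ["login", "password", "access", "account", "authentication"].any (fun term => PySem.Str.isIn term problem_lower) then
    "1. Check if your account is locked due to too many failed attempts\n2. Ensure your device time and date are accurate (important for authentication)\n3. Check if you need to connect to VPN first before accessing certain systems\n4. Try accessing from a different device to determine if it's device-specific\n5. Check if multi-factor authentication needs to be reconfigured\n6. Verify that your account hasn't expired or been disabled\n7. Make sure you're using the correct domain if applicable (corporate vs. local account)\n\nThese steps address more complex authentication and account access issues."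
  else
    "1. Take screenshots of any error messages for support reference\n2. Check if colleagues are experiencing similar issues\n3. Note when the issue started and any changes made around that time\n4. Try using an alternative software/method temporarily if available\n5. Check system requirements for the software you're using\n6. Review recent updates that might have affected system behavior\n7. Create a detailed document of when the issue occurs and steps to reproduce\n\nHaving this documentation will help support staff diagnose and fix the issue more quickly."

-- ===== PORT B =====
def pvFlat : List (String × Nat) := [("pc", 0), ("computer", 0), ("desktop", 0), ("laptop", 0), ("hanging", 0), ("freeze", 0), ("slow", 0), ("crash", 0), ("network", 1), ("internet", 1), ("wifi", 1), ("connection", 1), ("connect", 1), ("disconnected", 1), ("email", 2), ("outlook", 2), ("mail", 2), ("gmail", 2), ("message", 2), ("print", 3), ("printer", 3), ("scanning", 3), ("scanner", 3), ("software", 4), ("application", 4), ("program", 4), ("app", 4), ("not working", 4), ("login", 5), ("password", 5), ("access", 5), ("account", 5), ("authentication", 5)]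

def pvResponses : List String := [
  "1. Check for Windows updates and install if available\n2. Run System File Checker (SFC) by typing 'sfc /scannow' in Command Prompt\n3. Check for hardware issues using built-in diagnostics\n4. Try starting in Safe Mode to determine if it's a software conflict\n5. Check Event Viewer for specific error codes\n6. Perform a memory diagnostic test\n7. Disconnect external devices and test again\n\nThis should help identify whether it's a hardware or software issue.",
  "1. Reset TCP/IP stack by running 'netsh winsock reset' in Command Prompt\n2. Release and renew your IP address using 'ipconfig /release' and 'ipconfig /renew'\n3. Flush DNS cache with 'ipconfig /flushdns'\n4. Change DNS settings to public DNS (like Google's 8.8.8.8 and 8.8.4.4)\n5. Check for network adapter driver updates\n6. Disable VPN or proxy if using one\n7. Reset all network devices in the correct order (modem first, then router)\n\nThese steps address more advanced network configuration issues.",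
  "1. Run Outlook in Safe Mode (hold Ctrl while launching)\n2. Create a new Outlook profile and test with that\n3. Check if your mailbox needs to be repaired with the Inbox Repair Tool (scanpst.exe)\n4. Disable add-ins that might be causing issues\n5. Check your email account settings for maximum size limits\n6. Check if your email client is in offline mode\n7. Verify your anti-virus isn't blocking email connections\n\nThese solutions target Outlook-specific issues and account configuration problems.",
  "1. Clear the print queue (stop and restart Print Spooler service)\n2. Check printer IP address and make sure it hasn't changed\n3. Set a static IP for the printer if possible\n4. Update printer firmware (check manufacturer website)\n5. Check if printer needs calibration\n6. Try a different USB port or cable if directly connected\n7. Print directly to the device using its web interface if available\n\nThese steps help with more complex printer connection and driver issues.",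
  "1. Launch the application with admin privileges\n2. Check for conflicts with anti-virus or firewall settings\n3. Run the application in compatibility mode\n4. Create a new user profile and test there\n5. Check application logs for specific errors\n6. Verify all dependencies are installed (like .NET Framework or Visual C++ Redistributables)\n7. Try repairing the installation through Control Panel > Programs and Features\n\nThese steps help identify permission issues and software conflicts.",
  "1. Check if your account is locked due to too many failed attempts\n2. Ensure your device time and date are accurate (important for authentication)\n3. Check if you need to connect to VPN first before accessing certain systems\n4. Try accessing from a different device to determine if it's device-specific\n5. Check if multi-factor authentication needs to be reconfigured\n6. Verify that your account hasn't expired or been disabled\n7. Make sure you're using the correct domain if applicable (corporate vs. local account)\n\nThese steps address more complex authentication and account access issues.",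
  "1. Take screenshots of any error messages for support reference\n2. Check if colleagues are experiencing similar issues\n3. Note when the issue started and any changes made around that time\n4. Try using an alternative software/method temporarily if available\n5. Check system requirements for the software you're using\n6. Review recent updates that might have affected system behavior\n7. Create a detailed document of when the issue occurs and steps to reproduce\n\nHaving this documentation will help support staff diagnose and fix the issue more quickly."]

-- Source B: best = 6; for kw, idx in _FLAT: if kw in pl: best = min(best, idx); return _RESPONSES[best]
-- (the index is always in range 0..6, so the Python indexing never raises; getD with "" is exact)
def get_secondary_fallback_steps_alt (problem : String) : String :=
  let pl := PySem.Str.lower problem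
  let best := pvFlat.foldl (fun best p => if PySem.Str.isIn p.1 pl then min best p.2 else best) 6
  pvResponses.getD best ""

-- ===== PRECONDITION & SPEC =====
def Spec_get_secondary_fallback_steps (problem : String) (out : String) : Prop := out = get_secondary_fallback_steps_alt problem
instance (problem : String) (out : String) : Decidable (Spec_get_secondary_fallback_steps problem out) := by unfold Spec_get_secondary_fallback_steps; infer_instance

-- ===== CLAIM (what is proved, stated in full; the proofs are below) =====
def Claim_equal_get_secondary_fallback_steps : Prop := ∀ (problem : String), Dom_get_secondary_fallback_steps problem → Spec_get_secondary_fallback_steps problem (get_secondary_fallback_steps problem)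

-- ===== LEMMAS AND PROOFS =====

-- Folding the min-accumulator over a keyword group that all carries the same priority i
-- either lowers the accumulator to min a i (if some keyword matches) or leaves it alone.
theorem pv_foldl_min_group (pl : String) (kws : List String) (i a : Nat) :
    (kws.map (fun k => (k, i))).foldl
      (fun best p => if PySem.Str.isIn p.1 pl then min best p.2 else best) a
    = if kws.any (fun t => PySem.Str.isIn t pl) then min a i else a := by
  induction kws generalizing a with
  | nil => simp
  | cons k ks ih =>
    simp only [List.map_cons, List.foldl_cons, List.any_cons, Bool.or_eq_true]
    by_cases h : PySem.Str.isIn k pl = true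
    · rw [if_pos h, ih, if_pos (Or.inl h)]
      by_cases h2 : (ks.any fun t => PySem.Str.isIn t pl) = true
      · rw [if_pos h2, min_assoc, min_self]
      · rw [if_neg h2]
    · rw [if_neg h, ih]
      by_cases h2 : (ks.any fun t => PySem.Str.isIn t pl) = true
      · rw [if_pos h2, if_pos (Or.inr h2)]
      · rw [if_neg h2, if_neg (not_or.mpr ⟨h, h2⟩)]

-- pvFlat is the concatenation of the six keyword groups tagged with their priorities.
theorem pv_flat_groups : pvFlat = ((["pc", "computer", "desktop", "laptop", "hanging", "freeze", "slow", "crash"] : List String).map (fun k => (k, (0 : Nat)))) ++ ((["network", "internet", "wifi", "connection", "connect", "disconnected"] : List String).map (fun k => (k, (1 : Nat)))) ++ ((["email", "outlook", "mail", "gmail", "message"] : List String).map (fun k => (k, (2 : Nat)))) ++ ((["print", "printer", "scanning", "scanner"] : List String).map (fun k => (k, (3 : Nat)))) ++ ((["software", "application", "program", "app", "not working"] : List String).map (fun k => (k, (4 : Nat)))) ++ ((["login", "password", "access", "account", "authentication"] : List String).map (fun k => (k, (5 : Nat)))) := rfl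

-- The priority selection, stated over atoms: the if/elif chain equals the table lookup
-- at the nested-min index produced by the six group folds.
theorem pv_select (b0 b1 b2 b3 b4 b5 : Bool) (r0 r1 r2 r3 r4 r5 r6 : String) :
    (if b0 = true then r0 else if b1 = true then r1 else if b2 = true then r2 else
     if b3 = true then r3 else if b4 = true then r4 else if b5 = true then r5 else r6)
    = [r0, r1, r2, r3, r4, r5, r6].getD
        (if b5 = true then min (if b4 = true then min (if b3 = true then min (if b2 = true then min (if b1 = true then min (if b0 = true then min 6 0 else 6) 1 else (if b0 = true then min 6 0 else 6)) 2 else (if b1 = true then min (if b0 = true then min 6 0 else 6) 1 else (if b0 = true then min 6 0 else 6))) 3 else (if b2 = true then min (if b1 = true then min (if b0 = true then min 6 0 else 6) 1 else (if b0 = true then min 6 0 else 6)) 2 else (if b1 = true then min (if b0 = true then min 6 0 else 6) 1 else (if b0 = true then min 6 0 else 6)))) 4 else (if b3 = true then min (if b2 = true then min (if b1 = true then min (if b0 = true then min 6 0 else 6) 1 else (if b0 = true then min 6 0 else 6)) 2 else (if b1 = true then min (if b0 = true then min 6 0 else 6) 1 else (if b0 = true then min 6 0 else 6))) 3 else (if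 b2 = true then min (if b1 = true then min (if b0 = true then min 6 0 else 6) 1 else (if b0 = true then min 6 0 else 6)) 2 else (if b1 = true then min (if b0 = true then min 6 0 else 6) 1 else (if b0 = true then min 6 0 else 6))))) 5 else (if b4 = true then min (if b3 = true then min (if b2 = true then min (if b1 = true then min (if b0 = true then min 6 0 else 6) 1 else (if b0 = true then min 6 0 else 6)) 2 else (if b1 = true then min (if b0 = true then min 6 0 else 6) 1 else (if b0 = true then min 6 0 else 6))) 3 else (if b2 = true then min (if b1 = true then min (if b0 = true then min 6 0 else 6) 1 else (if b0 = true then min 6 0 else 6)) 2 else (if b1 = true then min (if b0 = true then min 6 0 else 6) 1 else (if b0 = true then min 6 0 else 6)))) 4 else (if b3 = true then min (if b2 = true then min (if b1 = true then min (if b0 = true then min 6 0 else 6) 1 else (if b0 = true then min 6 0 else 6)) 2 else (if b1 = true then min (if b0 = true then min 6 0 else 6) 1 else (if b0 = true then min 6 0 else 6))) 3 else (if b2 = true then min (if b1 = true then min (if b0 = true then min 6 0 else 6) 1 else (if b0 = true then min 6 0 else 6)) 2 else (if b1 = true then min (if b0 = true then min 6 0 else 6) 1 else (if b0 = true then min 6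 0 else 6)))))) "" := by
  cases b0 <;> cases b1 <;> cases b2 <;> cases b3 <;> cases b4 <;> cases b5 <;> rfl

-- ===== VERDICT (by name: the statement is the Claim_ definition above) =====
theorem get_secondary_fallback_steps_spec : Claim_equal_get_secondary_fallback_steps := by
  intro problem _
  show get_secondary_fallback_steps problem = get_secondary_fallback_steps_alt problem
  simp only [get_secondary_fallback_steps, get_secondary_fallback_steps_alt, pv_flat_groups,
    List.foldl_append, pv_foldl_min_group, pvResponses]
  exact pv_select _ _ _ _ _ _ _ _ _ _ _ _ _
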